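-- pv_equiv track=rewrite | github.com/mo-mosverkstad/my_python_game | catch_the_mouse/mouse_path.py | look_for_path
-- ===== SOURCE A (Python) =====
-- def get_key(item): return item[0]
--
-- def look_for_path(solution_path, mouse_pos):
--     possible_path = list()
--     for path in solution_path:
--         for i in range(len(path)):
--             step, pos = path[i]
--             if pos == mouse_pos:
--                 possible_path.append((len(path[i:]), path[i:]))
--     if len(possible_path) == 0:
--         return None
--     else:
--         length, path = list(sorted(possible_path, key=get_key))[0]
--         return path
-- ===== SOURCE B (Python) =====
-- def look_for_path(solution_path, mouse_pos):
--     best_len = None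
--     best_suffix = None
--     for path in solution_path:
--         for i in range(len(path) - 1, -1, -1):
--             if path[i][1] == mouse_pos:
--                 if best_len is None or len(path) - i < best_len:
--                     best_len = len(path) - i
--                     best_suffix = path[i:]
--                 break
--     return best_suffix
-- ===== Notes on version B (the rewrite author's own statement) =====
-- stated objective: alternative
-- what changed: B drops A's collect-all-matching-suffixes list and stable sort: it scans each path backwards with an early break to its last matching index (the shortest suffix of that path) and keeps a running global best with a strict comparison, which reproduces A's stable-sort tie-breaking (earliest path wins).
import Mathlib
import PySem

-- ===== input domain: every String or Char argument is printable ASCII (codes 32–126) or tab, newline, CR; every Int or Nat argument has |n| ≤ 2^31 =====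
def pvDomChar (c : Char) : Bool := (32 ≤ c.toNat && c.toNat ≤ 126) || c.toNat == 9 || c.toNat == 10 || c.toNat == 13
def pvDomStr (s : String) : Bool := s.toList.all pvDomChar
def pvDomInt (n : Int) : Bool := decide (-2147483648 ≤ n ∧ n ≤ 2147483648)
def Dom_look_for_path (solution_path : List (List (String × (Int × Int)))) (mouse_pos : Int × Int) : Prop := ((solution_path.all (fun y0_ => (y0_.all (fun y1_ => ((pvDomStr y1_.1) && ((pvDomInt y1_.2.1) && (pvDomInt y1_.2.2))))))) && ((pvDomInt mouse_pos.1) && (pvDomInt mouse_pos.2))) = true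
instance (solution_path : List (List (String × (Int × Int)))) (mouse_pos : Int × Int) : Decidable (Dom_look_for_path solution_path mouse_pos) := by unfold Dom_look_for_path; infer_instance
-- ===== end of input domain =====

-- B replaces A's collect-all-suffixes-then-stable-sort by a per-path backward scan with
-- early break and a running global best (objective: alternative decomposition, no sort).

-- ===== PORT A =====
-- A's default used by pyGetD; the loop index is always in range, so it is never read.
def pvDflt : String × (Int × Int) := ("", ((0 : Int), (0 : Int)))

def look_for_path (solution_path : List (List (String × (Int × Int)))) (mouse_pos : Int × Int) : Option (List (String × (Int × Int))) :=
  let possible_path : List (Int × List (String × (Int × Int))) :=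
    solution_path.foldl (fun acc path =>
      (PySem.List.pyRange 0 (PySem.List.len path) 1).foldl (fun acc2 i =>
        let step_pos := PySem.List.pyGetD path i pvDflt
        if step_pos.2 = mouse_pos then
          acc2 ++ [(PySem.List.len (PySem.List.slice path (some i) none),
                    PySem.List.slice path (some i) none)]
        else acc2) acc) []
  if possible_path.length = 0 then none
  else
    match PySem.List.sorted possible_path (fun item => item.1) with
    | [] => none  -- unreachable: guarded by the length test
    | (_, path) :: _ => some path

-- ===== PORT B =====
def look_for_path_alt (solution_path : List (List (String × (Int × Int)))) (mouse_pos : Int × Int) : Option (List (String × (Int × Int))) :=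
  let best :=
    solution_path.foldl (fun (best : Option (Int × List (String × (Int × Int)))) path =>
      -- scan the path from the end; the first hit is the break point
      match (PySem.List.pyRange (PySem.List.len path - 1) (-1) (-1)).find?
              (fun i => (PySem.List.pyGetD path i pvDflt).2 == mouse_pos) with
      | none => best
      | some i =>
        let l := PySem.List.len path - i
        match best with
        | none => some (l, PySem.List.slice path (some i) none)
        | some (bl, bs) =>
          if l < bl then some (l, PySem.List.slice path (some i) none) else some (bl, bs)) none
  best.map (·.2)

-- ===== PRECONDITION & SPEC =====
def Spec_look_for_path (solution_path : List (List (String × (Int × Int)))) (mouse_pos : Int × Int) (out : Option (List (String × (Int × Int)))) : Prop := out = look_for_path_alt solution_path mouse_pos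
instance (solution_path : List (List (String × (Int × Int)))) (mouse_pos : Int × Int) (out : Option (List (String × (Int × Int)))) : Decidable (Spec_look_for_path solution_path mouse_pos out) := by unfold Spec_look_for_path; infer_instance

-- ===== CLAIM (what is proved, stated in full; the proofs are below) =====
def Claim_equal_look_for_path : Prop := ∀ (solution_path : List (List (String × (Int × Int)))) (mouse_pos : Int × Int), Dom_look_for_path solution_path mouse_pos → Spec_look_for_path solution_path mouse_pos (look_for_path solution_path mouse_pos)

-- ===== LEMMAS AND PROOFS =====

-- running-best step: first strict minimum by the length component
def pvBestStep (o : Option (Int × List (String × (Int × Int)))) (c : Int × List (String × (Int × Int))) : Option (Int × List (String × (Int × Int))) :=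
  match o with
  | none => some c
  | some m => if c.1 < m.1 then some c else some m

-- the candidate list A builds for one path, structurally (suffix length, suffix)
def pvCands (mouse_pos : Int × Int) : List (String × (Int × Int)) → List (Int × List (String × (Int × Int)))
  | [] => []
  | x :: t => if x.2 = mouse_pos then (((t.length : Int) + 1), x :: t) :: pvCands mouse_pos t
              else pvCands mouse_pos t

-- B's per-path step, expressed through pvCands
def pvStepB (mouse_pos : Int × Int) (o : Option (Int × List (String × (Int × Int)))) (p : List (String × (Int × Int))) : Option (Int × List (String × (Int × Int))) :=
  match (pvCands mouse_pos p).getLast? with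
  | none => o
  | some c => pvBestStep o c

theorem pv_head_insertBy (x : Int × List (String × (Int × Int))) (ys : List (Int × List (String × (Int × Int)))) :
    (PySem.List.insertBy (fun a b => decide (a.1 < b.1)) x ys).head? = pvBestStep ys.head? x := by
  cases ys with
  | nil => rfl
  | cons y t =>
    simp only [PySem.List.insertBy, pvBestStep]
    split_ifs with h <;> simp_all

theorem pv_head_foldl_insertBy (l : List (Int × List (String × (Int × Int)))) :
    ∀ acc, (l.foldl (fun acc x => PySem.List.insertBy (fun a b => decide (a.1 < b.1)) x acc) acc).head?
      = l.foldl pvBestStep acc.head? := by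
  induction l with
  | nil => intro acc; rfl
  | cons x t ih =>
    intro acc
    simp only [List.foldl_cons, ih, pv_head_insertBy]

theorem pv_head_sorted (l : List (Int × List (String × (Int × Int)))) :
    (PySem.List.sorted l (fun item => item.1)).head? = l.foldl pvBestStep none := by
  rw [PySem.List.sorted_eq_foldl_insertBy]
  simpa using pv_head_foldl_insertBy l []

theorem pv_cands_le (mp : Int × Int) : ∀ (p : List (String × (Int × Int))) (c), c ∈ pvCands mp p → c.1 ≤ (p.length : Int) := by
  intro p
  induction p with
  | nil => simp [pvCands]
  | cons x t ih =>
    intro c hc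
    simp only [pvCands] at hc
    split_ifs at hc with h
    · rcases List.mem_cons.mp hc with h1 | h1
      · subst h1; simp
      · have := ih c h1; simp; omega
    · have := ih c hc; simp; omega

theorem pv_cands_pairwise (mp : Int × Int) : ∀ (p : List (String × (Int × Int))), (pvCands mp p).Pairwise (fun a b => b.1 < a.1) := by
  intro p
  induction p with
  | nil => simp [pvCands]
  | cons x t ih =>
    simp only [pvCands]
    split_ifs with h
    · refine List.Pairwise.cons ?_ ih
      intro b hb
      have := pv_cands_le mp t b hb
      simp only
      omega
    · exact ih

theorem pv_bestF_dec (l : List (Int × List (String × (Int × Int))))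
    (hl : l.Pairwise (fun a b => b.1 < a.1)) :
    ∀ o, l.foldl pvBestStep o = match l.getLast? with | none => o | some c => pvBestStep o c := by
  induction l with
  | nil => intro o; rfl
  | cons c t ih =>
    intro o
    rw [List.foldl_cons]
    rw [ih (List.Pairwise.of_cons hl)]
    cases ht : t.getLast? with
    | none =>
      have : t = [] := by
        cases t with
        | nil => rfl
        | cons a b => simp [List.getLast?_eq_some_getLast] at ht
      subst this; rfl
    | some c' =>
      have hmem : c' ∈ t := List.mem_of_getLast? ht
      have hlt : c'.1 < c.1 := (List.pairwise_cons.mp hl).1 c' hmem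
      have hlast : (c :: t).getLast? = some c' := by
        cases t with
        | nil => simp at ht
        | cons a b => rw [List.getLast?_cons_cons, ht]
      rw [hlast]
      cases o with
      | none => simp [pvBestStep, hlt]
      | some m =>
        simp only [pvBestStep]
        split_ifs <;> simp_all <;> omega

-- A's inner index loop, after reduction to List.range, builds acc ++ pvCands
theorem pv_innerA_range (mp : Int × Int) :
    ∀ (p : List (String × (Int × Int))) (acc : List (Int × List (String × (Int × Int)))),
    (List.range p.length).foldl
      (fun acc2 k => if (p.getD k pvDflt).2 = mp then acc2 ++ [((p.length : Int) - (k : Int), p.drop k)] else acc2) acc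
      = acc ++ pvCands mp p := by
  intro p
  induction p with
  | nil => intro acc; simp [pvCands]
  | cons x t ih =>
    intro acc
    rw [List.length_cons, List.range_succ_eq_map, List.foldl_cons, List.foldl_map]
    refine Eq.trans (List.foldl_ext _
      (fun acc2 k => if (t.getD k pvDflt).2 = mp then acc2 ++ [((t.length : Int) - (k : Int), t.drop k)] else acc2)
      _ ?_) ?_
    · intro a k _
      simp only [List.getD_cons_succ, List.drop_succ_cons]
      push_cast
      ring_nf
    · rw [ih]
      by_cases h : x.2 = mp
      · simp only [List.getD_cons_zero, List.drop_zero, h, if_pos]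
        simp [pvCands, h]
      · simp only [List.getD_cons_zero, List.drop_zero, h, if_neg, not_false_iff]
        simp [pvCands, h]

-- the port's inner pyRange loop equals the List.range loop above
theorem pv_innerA (mp : Int × Int) (p : List (String × (Int × Int))) (acc : List (Int × List (String × (Int × Int)))) :
    (PySem.List.pyRange 0 (PySem.List.len p) 1).foldl (fun acc2 i =>
        if (PySem.List.pyGetD p i pvDflt).2 = mp then
          acc2 ++ [(PySem.List.len (PySem.List.slice p (some i) none),
                    PySem.List.slice p (some i) none)]
        else acc2) acc = acc ++ pvCands mp p := by
  rw [PySem.List.len_eq, PySem.List.pyRange_zero_nat, List.foldl_map]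
  rw [← pv_innerA_range mp p acc]
  apply List.foldl_ext
  intro a k hk
  have hk' : k < p.length := List.mem_range.mp hk
  simp only [PySem.List.pyGetD_natCast, PySem.List.slice_from_natCast, PySem.List.len_eq]
  have hlen : ((p.drop k).length : Int) = (p.length : Int) - (k : Int) := by
    simp [List.length_drop]
    omega
  rw [hlen]

-- B's per-path match-and-update equals pvStepB
theorem pv_find_congr {l : List Int} {pr q : Int → Bool} (h : ∀ x ∈ l, pr x = q x) :
    l.find? pr = l.find? q := by
  induction l with
  | nil => rfl
  | cons x t ih =>
    simp only [List.find?_cons]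
    rw [h x (List.mem_cons_self)]
    cases q x
    · exact ih (fun y hy => h y (List.mem_cons_of_mem _ hy))
    · rfl

theorem pv_cands_snoc (mp : Int × Int) (x : String × (Int × Int)) :
    ∀ (t : List (String × (Int × Int))),
    pvCands mp (t ++ [x]) = (pvCands mp t).map (fun c => (c.1 + 1, c.2 ++ [x]))
      ++ (if x.2 = mp then [((1 : Int), [x])] else []) := by
  intro t
  induction t with
  | nil =>
    simp only [List.nil_append, pvCands, List.map_nil]
    split_ifs with h <;> simp
  | cons y t ih =>
    simp only [List.cons_append, pvCands, ih]
    split_ifs with h <;> simp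

theorem pv_findB (mp : Int × Int) (p : List (String × (Int × Int))) :
    (match (PySem.List.pyRange (PySem.List.len p - 1) (-1) (-1)).find?
              (fun i => (PySem.List.pyGetD p i pvDflt).2 == mp) with
      | none => (none : Option (Int × List (String × (Int × Int))))
      | some i => some (PySem.List.len p - i, PySem.List.slice p (some i) none))
    = (pvCands mp p).getLast? := by
  induction p using List.reverseRecOn with
  | nil =>
    rw [PySem.List.pyRange_neg_one_eq_nil (by simp [PySem.List.len_eq])]
    simp [pvCands]
  | append_singleton t x ih =>
    have hlen : PySem.List.len (t ++ [x]) - 1 = (t.length : Int) := by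
      simp [PySem.List.len_eq]
    rw [hlen, PySem.List.pyRange_neg_one_cons (by omega)]
    rw [List.find?_cons]
    have hget : PySem.List.pyGetD (t ++ [x]) (t.length : Int) pvDflt = x := by
      simp [PySem.List.pyGetD_natCast, List.getD]
    rw [hget]
    by_cases hx : x.2 = mp
    · simp only [hx, beq_self_eq_true]
      rw [pv_cands_snoc, if_pos hx, List.getLast?_concat]
      have h1 : PySem.List.len (t ++ [x]) - (t.length : Int) = 1 := by
        simp [PySem.List.len_eq]
      have h2 : PySem.List.slice (t ++ [x]) (some (t.length : Int)) none = [x] := by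
        rw [PySem.List.slice_from_natCast]
        exact List.drop_left
      rw [h1, h2]
    · have hxb : (x.2 == mp) = false := by simpa using hx
      simp only [hxb]
      have hpred : ∀ i ∈ PySem.List.pyRange ((t.length : Int) - 1) (-1) (-1),
          ((PySem.List.pyGetD (t ++ [x]) i pvDflt).2 == mp)
          = ((PySem.List.pyGetD t i pvDflt).2 == mp) := by
        intro i hi
        have hb := PySem.List.mem_pyRange_neg_one.mp hi
        have h0 : 0 ≤ i := by omega
        have hlt : i < (t.length : Int) := by omega
        have : i = ((i.toNat : Nat) : Int) := by omega
        rw [this]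
        have hkl : i.toNat < t.length := by omega
        simp only [PySem.List.pyGetD_natCast, List.getD]
        rw [List.getElem?_append_left hkl]
      rw [pv_find_congr hpred]
      have hlen2 : ((t.length : Int) - 1) = PySem.List.len t - 1 := by
        simp [PySem.List.len_eq]
      rw [hlen2]
      rw [pv_cands_snoc, if_neg hx, List.append_nil, List.getLast?_map]
      cases hf : (PySem.List.pyRange (PySem.List.len t - 1) (-1) (-1)).find?
          (fun i => (PySem.List.pyGetD t i pvDflt).2 == mp) with
      | none =>
        rw [hf] at ih
        rw [← ih]
        rfl
      | some i =>
        rw [hf] at ih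
        rw [← ih]
        simp only [Option.map_some]
        have hbnd := PySem.List.mem_pyRange_neg_one.mp (List.mem_of_find?_eq_some hf)
        rw [PySem.List.len_eq] at hbnd
        have h0 : 0 ≤ i := by omega
        have hle : i ≤ (t.length : Int) := by omega
        have hnat : i = ((i.toNat : Nat) : Int) := by omega
        have hslice : PySem.List.slice (t ++ [x]) (some i) none
            = PySem.List.slice t (some i) none ++ [x] := by
          rw [hnat, PySem.List.slice_from_natCast, PySem.List.slice_from_natCast]
          exact List.drop_append_of_le_length (by omega)
        have hl : PySem.List.len (t ++ [x]) - i = (PySem.List.len t - i) + 1 := by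
          simp [PySem.List.len_eq]; ring
        rw [hslice, hl]

-- A equals the running-best fold
theorem pv_outer (mp : Int × Int) :
    ∀ (sp : List (List (String × (Int × Int)))) (acc : List (Int × List (String × (Int × Int)))),
    (sp.foldl (fun acc p => acc ++ pvCands mp p) acc).foldl pvBestStep none
      = sp.foldl (fun o p => (pvCands mp p).foldl pvBestStep o) (acc.foldl pvBestStep none) := by
  intro sp
  induction sp with
  | nil => intro acc; rfl
  | cons p t ih =>
    intro acc
    rw [List.foldl_cons, ih, List.foldl_cons, List.foldl_append]

theorem pv_A_eq (sp : List (List (String × (Int × Int)))) (mp : Int × Int) :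
    look_for_path sp mp = (sp.foldl (pvStepB mp) none).map (·.2) := by
  unfold look_for_path
  have hposs : sp.foldl (fun acc path =>
      (PySem.List.pyRange 0 (PySem.List.len path) 1).foldl (fun acc2 i =>
        let step_pos := PySem.List.pyGetD path i pvDflt
        if step_pos.2 = mp then
          acc2 ++ [(PySem.List.len (PySem.List.slice path (some i) none),
                    PySem.List.slice path (some i) none)]
        else acc2) acc) []
      = sp.foldl (fun acc p => acc ++ pvCands mp p) [] := by
    apply List.foldl_ext
    intro a p _
    exact pv_innerA mp p a
  simp only [hposs]
  have hbest : (sp.foldl (fun acc p => acc ++ pvCands mp p) []).foldl pvBestStep none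
      = sp.foldl (pvStepB mp) none := by
    rw [pv_outer mp sp []]
    simp only [List.foldl_nil]
    apply List.foldl_ext
    intro o p _
    rw [pv_bestF_dec _ (pv_cands_pairwise mp p)]
    rfl
  by_cases hnil : sp.foldl (fun acc p => acc ++ pvCands mp p) [] = []
  · rw [hnil]
    have : (sp.foldl (pvStepB mp) none) = none := by
      rw [← hbest, hnil]; rfl
    simp [this]
  · rw [if_neg (by simpa using fun h => hnil (List.eq_nil_of_length_eq_zero h))]
    have hs := pv_head_sorted (sp.foldl (fun acc p => acc ++ pvCands mp p) [])
    rw [hbest] at hs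
    cases hsort : PySem.List.sorted (sp.foldl (fun acc p => acc ++ pvCands mp p) []) (fun item => item.1) with
    | nil =>
      exact absurd ((PySem.List.sorted_eq_nil_iff _ _ _).mp hsort) hnil
    | cons m rest =>
      rw [hsort] at hs
      simp only [List.head?_cons] at hs
      rw [← hs]
      rfl

theorem pv_B_eq (sp : List (List (String × (Int × Int)))) (mp : Int × Int) :
    look_for_path_alt sp mp = (sp.foldl (pvStepB mp) none).map (·.2) := by
  unfold look_for_path_alt
  dsimp only
  congr 1
  apply List.foldl_ext
  intro o p _
  have h := pv_findB mp p
  simp only [pvStepB, ← h]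
  cases hf : (PySem.List.pyRange (PySem.List.len p - 1) (-1) (-1)).find?
      (fun i => (PySem.List.pyGetD p i pvDflt).2 == mp) with
  | none => rfl
  | some i =>
    cases o with
    | none => rfl
    | some m => cases m; rfl

-- ===== VERDICT (by name: the statement is the Claim_ definition above) =====
theorem look_for_path_spec : Claim_equal_look_for_path := by
  intro sp mp _
  unfold Spec_look_for_path
  rw [pv_A_eq, pv_B_eq]
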